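-- pv_equiv track=rewrite | github.com/pritam-raskar/sqaid-chatbot-v2 | chatbot-system/backend/app/intelligence/orchestration/data_merger.py | _find_common_keys
-- ===== SOURCE A (Python) =====
-- from typing import List, Dict, Any, Optional, Set
--
-- def _find_common_keys(data: List[Dict[str, Any]]) -> Set[str]:
--     """
--     Find keys that appear in multiple records.
--
--     Args:
--         data: List of data records
--
--     Returns:
--         Set of common keys
--     """
--     if not data:
--         return set()
--
--     # Get all keys from first record
--     common = set(data[0].keys())
--
--     # Intersect with keys from other records
--     for record in data[1:]:
--         common = common.intersection(set(record.keys()))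
--
--     # Remove metadata keys
--     common = common - {"_source"}
--
--     return common
-- ===== SOURCE B (Python) =====
-- from collections import Counter
--
-- def _find_common_keys(data):
--     if not data:
--         return set()
--     counts = Counter()
--     for record in data:
--         counts.update(record.keys())
--     n = len(data)
--     return {k for k, c in counts.items() if c == n and k != "_source"}
-- ===== Notes on version B (the rewrite author's own statement) =====
-- stated objective: alternative
-- what changed: Replaces the progressive set-intersection fold with a two-pass frequency table: one pass tallies every key with a Counter, a second pass keeps the keys whose tally equals len(data) (minus '_source').
import Mathlib
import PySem

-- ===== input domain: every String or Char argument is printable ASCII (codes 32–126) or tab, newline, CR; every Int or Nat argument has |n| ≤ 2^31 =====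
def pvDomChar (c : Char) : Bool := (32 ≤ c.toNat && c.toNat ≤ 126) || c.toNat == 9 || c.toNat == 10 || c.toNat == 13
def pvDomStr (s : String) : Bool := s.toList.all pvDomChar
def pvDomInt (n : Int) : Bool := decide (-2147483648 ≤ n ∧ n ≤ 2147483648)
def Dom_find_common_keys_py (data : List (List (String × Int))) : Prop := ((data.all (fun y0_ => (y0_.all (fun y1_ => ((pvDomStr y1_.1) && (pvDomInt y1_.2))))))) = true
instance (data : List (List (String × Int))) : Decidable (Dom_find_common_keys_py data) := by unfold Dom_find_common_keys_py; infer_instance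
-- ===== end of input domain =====

-- B replaces A's progressive set-intersection fold by a two-pass frequency table
-- (tally every key once per record, then keep keys whose tally equals len(data), minus "_source");
-- objective: alternative (same asymptotic cost, different algorithm).

-- ===== PORT A =====
-- record.keys() for the assoc-list dict is record.map Prod.fst (keys of a Python dict are distinct; see Pre_).
def find_common_keys_py (data : List (List (String × Int))) : List String :=
  match data with
  | [] => []
  | d0 :: rest =>
    -- common = set(data[0].keys())
    let common := PySem.Set.ofList (d0.map Prod.fst)
    -- for record in data[1:]: common = common.intersection(set(record.keys()))
    let common := rest.foldl
      (fun c record => PySem.Set.inter c (PySem.Set.ofList (record.map Prod.fst))) common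
    -- common = common - {"_source"}
    PySem.Set.diff common (PySem.Set.ofList ["_source"])

-- ===== PORT B =====
def find_common_keys_py_alt (data : List (List (String × Int))) : List String :=
  match data with
  | [] => []
  | _ :: _ =>
    -- counts = Counter(); for record in data: counts.update(record.keys())
    let counts := data.foldl
      (fun d record => (record.map Prod.fst).foldl (fun d k => d.modify k 0 (· + 1)) d)
      PySem.Dict.empty
    let n : Int := (data.length : Int)
    -- {k for k, c in counts.items() if c == n and k != "_source"}
    PySem.Set.ofList
      (((counts.items).filter (fun p => p.2 == n && p.1 != "_source")).map Prod.fst)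

-- ===== PRECONDITION & SPEC =====
-- Pre_ is the dict-representation invariant: each record is a Python dict, so its key list has no
-- duplicates; every input the Python A accepts satisfies it.
def Pre_find_common_keys_py (data : List (List (String × Int))) : Prop :=
  ∀ record ∈ data, (record.map Prod.fst).Nodup
instance (data : List (List (String × Int))) : Decidable (Pre_find_common_keys_py data) := by
  unfold Pre_find_common_keys_py; infer_instance

def pvWitness_find_common_keys_py : (List (List (String × Int))) :=
  [[("a", 1), ("b", 2)], [("b", 3), ("_source", 0)]]

def Spec_find_common_keys_py (data : List (List (String × Int))) (out : List String) : Prop := out = find_common_keys_py_alt data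
instance (data : List (List (String × Int))) (out : List String) : Decidable (Spec_find_common_keys_py data out) := by unfold Spec_find_common_keys_py; infer_instance

-- ===== CLAIM (what is proved, stated in full; the proofs are below) =====
def Claim_equal_find_common_keys_py : Prop := ∀ (data : List (List (String × Int))), Dom_find_common_keys_py data → Pre_find_common_keys_py data → Spec_find_common_keys_py data (find_common_keys_py data)

-- ===== LEMMAS AND PROOFS =====

-- keys of a record
def pvKeys (r : List (String × Int)) : List String := r.map Prod.fst

-- A's intersection fold is a single filter over the starting set.
theorem pv_foldl_inter (L : List (List (String × Int))) (s : List String) :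
    L.foldl (fun c record => PySem.Set.inter c (PySem.Set.ofList (record.map Prod.fst))) s
      = s.filter (fun k => L.all (fun record => decide (k ∈ record.map Prod.fst))) := by
  induction L generalizing s with
  | nil => simp
  | cons r L ih =>
    rw [List.foldl_cons, ih]
    simp only [PySem.Set.inter]
    rw [List.filter_filter]
    apply List.filter_congr
    intro k _
    rw [Bool.eq_iff_iff]
    simp [PySem.Set.contains, PySem.Set.mem_ofList, List.all_cons, and_comm]

theorem pv_sum_le_length (l : List Nat) (h : ∀ x ∈ l, x ≤ 1) : l.sum ≤ l.length := by
  induction l with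
  | nil => simp
  | cons x l ih =>
    have hx := h x (by simp)
    have := ih (fun y hy => h y (by simp [hy]))
    simp only [List.sum_cons, List.length_cons]
    omega

theorem pv_sum_eq_length (l : List Nat) (h : ∀ x ∈ l, x ≤ 1) :
    l.sum = l.length ↔ ∀ x ∈ l, x = 1 := by
  induction l with
  | nil => simp
  | cons x l ih =>
    have hx := h x (by simp)
    have hrec := ih (fun y hy => h y (by simp [hy]))
    have hle := pv_sum_le_length l (fun y hy => h y (by simp [hy]))
    constructor
    · intro hs y hy
      rcases List.mem_cons.mp hy with rfl | hy
      · simp only [List.sum_cons, List.length_cons] at hs; omega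
      · exact hrec.mp (by simp only [List.sum_cons, List.length_cons] at hs; omega) y hy
    · intro hall
      have hx1 := hall x (by simp)
      have := hrec.mpr (fun y hy => hall y (by simp [hy]))
      simp only [List.sum_cons, List.length_cons]; omega

-- for a key of the first record, tally = len(data) ↔ the key is in every other record
theorem pv_count_char (d0 : List (String × Int)) (rest : List (List (String × Int)))
    (hpre : ∀ record ∈ d0 :: rest, (record.map Prod.fst).Nodup)
    (k : String) (hk : k ∈ d0.map Prod.fst) :
    ((d0 :: rest).flatMap pvKeys).count k = (d0 :: rest).length
      ↔ ∀ record ∈ rest, k ∈ record.map Prod.fst := by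
  have h0 : (d0.map Prod.fst).count k = 1 := by
    have hn := hpre d0 (by simp)
    have h1 := (List.nodup_iff_count_le_one).mp hn k
    have h2 := List.count_pos_iff.mpr hk
    omega
  have hle : ∀ r ∈ rest, ((r.map Prod.fst).count k) ≤ 1 := by
    intro r hr
    exact (List.nodup_iff_count_le_one).mp (hpre r (by simp [hr])) k
  have hflat : ((d0 :: rest).flatMap pvKeys).count k
      = (d0.map Prod.fst).count k + (rest.map (fun r => (r.map Prod.fst).count k)).sum := by
    simp [List.count_flatMap, Function.comp_def, pvKeys]
  have hle' : ∀ x ∈ rest.map (fun r => (r.map Prod.fst).count k), x ≤ 1 := by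
    intro x hx
    obtain ⟨r, hr, rfl⟩ := List.mem_map.mp hx
    exact hle r hr
  have hsum := pv_sum_eq_length (rest.map (fun r => (r.map Prod.fst).count k)) hle'
  have hsum_le := pv_sum_le_length (rest.map (fun r => (r.map Prod.fst).count k)) hle'
  rw [hflat, h0]
  simp only [List.length_cons, List.length_map] at *
  constructor
  · intro h r hr
    have : ∀ x ∈ rest.map (fun r => (r.map Prod.fst).count k), x = 1 :=
      hsum.mp (by omega)
    have := this ((r.map Prod.fst).count k) (List.mem_map.mpr ⟨r, hr, rfl⟩)
    exact List.count_pos_iff.mp (by omega)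
  · intro h
    have : ∀ x ∈ rest.map (fun r => (r.map Prod.fst).count k), x = 1 := by
      intro x hx
      obtain ⟨r, hr, rfl⟩ := List.mem_map.mp hx
      have := List.count_pos_iff.mpr (h r hr)
      have := hle r hr
      omega
    have := hsum.mpr this
    omega

-- a key absent from the first record never reaches tally len(data)
theorem pv_count_lt (d0 : List (String × Int)) (rest : List (List (String × Int)))
    (hpre : ∀ record ∈ d0 :: rest, (record.map Prod.fst).Nodup)
    (k : String) (hk : k ∉ d0.map Prod.fst) :
    ((d0 :: rest).flatMap pvKeys).count k ≠ (d0 :: rest).length := by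
  have h0 : (d0.map Prod.fst).count k = 0 := List.count_eq_zero.mpr hk
  have hle' : ∀ x ∈ rest.map (fun r => (r.map Prod.fst).count k), x ≤ 1 := by
    intro x hx
    obtain ⟨r, hr, rfl⟩ := List.mem_map.mp hx
    exact (List.nodup_iff_count_le_one).mp (hpre r (by simp [hr])) k
  have hsum_le := pv_sum_le_length (rest.map (fun r => (r.map Prod.fst).count k)) hle'
  have hflat : ((d0 :: rest).flatMap pvKeys).count k
      = (d0.map Prod.fst).count k + (rest.map (fun r => (r.map Prod.fst).count k)).sum := by
    simp [List.count_flatMap, Function.comp_def, pvKeys]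
  rw [hflat, h0]
  simp only [List.length_cons, List.length_map] at *
  omega

-- B's value as a filter over the deduped key stream
theorem pv_B_char (data : List (List (String × Int))) (h : data ≠ []) :
    find_common_keys_py_alt data
      = (PySem.Set.ofList (data.flatMap pvKeys)).filter
          (fun k => ((data.flatMap pvKeys).count k : Int) == (data.length : Int) && k != "_source") := by
  match data with
  | [] => exact absurd rfl h
  | d0 :: rest =>
    show PySem.Set.ofList _ = _
    have hfold : (d0 :: rest).foldl
        (fun d record => (record.map Prod.fst).foldl (fun d k => d.modify k 0 (· + 1)) d)
        PySem.Dict.empty = PySem.Dict.counter ((d0 :: rest).flatMap pvKeys) := by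
      rw [PySem.Dict.counter_eq_foldl, List.foldl_flatMap]
      rfl
    rw [hfold, PySem.Dict.items_counter, List.filter_map, List.map_map]
    have : (Prod.fst ∘ fun k => (k, (((d0 :: rest).flatMap pvKeys).count k : Int))) = id := rfl
    rw [this, List.map_id]
    apply PySem.Set.ofList_eq_self_of_nodup
    exact (PySem.Set.nodup_ofList _).filter _

theorem pv_main (data : List (List (String × Int)))
    (hpre : Pre_find_common_keys_py data) :
    find_common_keys_py data = find_common_keys_py_alt data := by
  match data with
  | [] => rfl
  | d0 :: rest =>
    rw [pv_B_char (d0 :: rest) (by simp)]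
    show PySem.Set.diff _ _ = _
    rw [pv_foldl_inter]
    unfold PySem.Set.diff
    rw [List.filter_filter]
    have hsplit : PySem.Set.ofList ((d0 :: rest).flatMap pvKeys)
        = PySem.Set.ofList (d0.map Prod.fst)
            ++ ((PySem.Set.ofList (rest.flatMap pvKeys)).filter
                 (fun y => !(PySem.Set.ofList (d0.map Prod.fst)).contains y)) := by
      have : (d0 :: rest).flatMap pvKeys = d0.map Prod.fst ++ rest.flatMap pvKeys := by
        simp [pvKeys]
      rw [this, PySem.Set.ofList_append, PySem.Set.update_eq_append_filter]
    rw [hsplit, List.filter_append]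
    have hextra : ((PySem.Set.ofList (rest.flatMap pvKeys)).filter
          (fun y => !(PySem.Set.ofList (d0.map Prod.fst)).contains y)).filter
          (fun k => ((( d0 :: rest).flatMap pvKeys).count k : Int) == ((d0 :: rest).length : Int) && k != "_source") = [] := by
      rw [List.filter_filter]
      apply List.filter_eq_nil_iff.mpr
      intro k hk hcontra
      rw [Bool.and_eq_true, Bool.and_eq_true] at hcontra
      have hnc := hcontra.2
      have hcnt := hcontra.1.1
      have hnot : k ∉ d0.map Prod.fst := by
        intro hx
        have hcmem : k ∈ PySem.Set.ofList (d0.map Prod.fst) := (PySem.Set.mem_ofList _ _).mpr hx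
        have hct : (PySem.Set.ofList (d0.map Prod.fst)).contains k = true := by
          simp [PySem.Set.contains, hcmem]
        rw [hct] at hnc
        simp at hnc
      exact absurd (by exact_mod_cast beq_iff_eq.mp hcnt) (pv_count_lt d0 rest hpre k hnot)
    rw [hextra, List.append_nil]
    apply List.filter_congr
    intro k hk
    have hkmem : k ∈ d0.map Prod.fst := (PySem.Set.mem_ofList _ _).mp hk
    have hchar := pv_count_char d0 rest hpre k hkmem
    have hsrc_eq : ((!(PySem.Set.ofList ["_source"]).contains k) = true) ↔ ¬ k = "_source" := by
      have e : PySem.Set.ofList ["_source"] = ["_source"] := by rfl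
      rw [e]
      simp [PySem.Set.contains]
    rw [Bool.eq_iff_iff, Bool.and_eq_true, Bool.and_eq_true, hsrc_eq]
    simp only [List.all_eq_true, decide_eq_true_eq, beq_iff_eq, bne_iff_ne, ne_eq]
    constructor
    · rintro ⟨hs, hall⟩
      exact ⟨by exact_mod_cast hchar.mpr hall, hs⟩
    · rintro ⟨hcnt, hs⟩
      exact ⟨hs, hchar.mp (by exact_mod_cast hcnt)⟩

-- ===== VERDICT (by name: the statement is the Claim_ definition above) =====
theorem find_common_keys_py_spec : Claim_equal_find_common_keys_py := by
  intro data _ hpre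
  unfold Spec_find_common_keys_py
  exact pv_main data hpre
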